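-- pv_equiv track=rewrite | github.com/duartemv00/DMVrandomScripts | python/longitudPalabras_v01.py | seccionarPalabras
-- ===== SOURCE A (Python) =====
-- def seccionarPalabras(sentence):
--     palabraDividida = {}
--     word = ""
--     for i in sentence:
--         if i==" ":
--             palabraDividida.update({word:len(word)})
--             word = ""
--         else:
--             word = word + i
--     palabraDividida.update({word:len(word)})
--     return palabraDividida
-- ===== SOURCE B (Python) =====
-- def seccionarPalabras(sentence):
--     return {w: len(w) for w in sentence.split(" ")}
-- ===== Notes on version B (the rewrite author's own statement) =====
-- stated objective: simpler
-- what changed: Replaces A's character-by-character buffer accumulation with an explicit single-space-separator split followed by a dict comprehension mapping each token to its length.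
import Mathlib
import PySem

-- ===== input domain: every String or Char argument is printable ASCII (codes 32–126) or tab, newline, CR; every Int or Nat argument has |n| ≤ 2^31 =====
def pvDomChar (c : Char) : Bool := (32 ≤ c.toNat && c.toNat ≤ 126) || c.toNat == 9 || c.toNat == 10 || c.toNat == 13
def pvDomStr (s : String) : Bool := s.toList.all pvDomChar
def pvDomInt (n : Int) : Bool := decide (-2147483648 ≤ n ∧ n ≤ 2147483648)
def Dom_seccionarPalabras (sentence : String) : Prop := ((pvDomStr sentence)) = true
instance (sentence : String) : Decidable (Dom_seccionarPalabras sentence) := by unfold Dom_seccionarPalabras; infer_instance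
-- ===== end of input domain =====

-- B replaces A's character-by-character buffer accumulation with split(" ") plus a
-- dict comprehension over the resulting token list (simpler decomposition, same cost).


-- ===== PORT A =====
-- the loop body: on ' ' commit the buffered word into the dict, else extend the buffer
def pvStepA (st : PySem.Dict String Int × List Char) (c : Char) :
    PySem.Dict String Int × List Char :=
  if c = ' ' then (st.1.insert (String.ofList st.2) (st.2.length : Int), ([] : List Char))
  else (st.1, st.2 ++ [c])

def seccionarPalabras (sentence : String) : List (String × Int) :=
  let r := sentence.toList.foldl pvStepA (PySem.Dict.empty, ([] : List Char))
  (r.1.insert (String.ofList r.2) (r.2.length : Int)).items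

-- ===== PORT B =====
def seccionarPalabras_alt (sentence : String) : List (String × Int) :=
  ((PySem.Chars.splitOn sentence.toList [' ']).foldl
      (fun d w => d.insert (String.ofList w) ((w.length : Int)))
      PySem.Dict.empty).items

-- ===== PRECONDITION & SPEC =====
def Spec_seccionarPalabras (sentence : String) (out : List (String × Int)) : Prop := out = seccionarPalabras_alt sentence
instance (sentence : String) (out : List (String × Int)) : Decidable (Spec_seccionarPalabras sentence out) := by unfold Spec_seccionarPalabras; infer_instance

-- ===== CLAIM (what is proved, stated in full; the proofs are below) =====
def Claim_equal_seccionarPalabras : Prop := ∀ (sentence : String), Dom_seccionarPalabras sentence → Spec_seccionarPalabras sentence (seccionarPalabras sentence)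

-- ===== LEMMAS AND PROOFS =====

-- reference splitter used only in the proofs: the words of l, given buffered prefix w
def pvWords (w : List Char) : List Char → List (List Char)
  | [] => [w]
  | c :: rest => if c = ' ' then w :: pvWords [] rest else pvWords (w ++ [c]) rest

theorem pvGo_nil (n : Nat) (cur : List Char) (acc : List (List Char)) :
    PySem.Chars.splitOn.go [' '] (n+1) [] cur acc = (cur.reverse :: acc).reverse := rfl

theorem pvGo_succ (n : Nat) (c : Char) (rest cur : List Char) (acc : List (List Char)) :
    PySem.Chars.splitOn.go [' '] (n+1) (c :: rest) cur acc =
      if [' '].isPrefixOf (c :: rest) = true then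
        PySem.Chars.splitOn.go [' '] n rest [] (cur.reverse :: acc)
      else PySem.Chars.splitOn.go [' '] n rest (c :: cur) acc := rfl

theorem pvGo_spec (fuel : Nat) (l cur : List Char) (acc : List (List Char))
    (h : l.length < fuel) :
    PySem.Chars.splitOn.go [' '] fuel l cur acc
      = acc.reverse ++ pvWords cur.reverse l := by
  induction fuel generalizing l cur acc with
  | zero => omega
  | succ n ih =>
    cases l with
    | nil => rw [pvGo_nil]; simp [pvWords]
    | cons c rest =>
      rw [pvGo_succ]
      by_cases hc : c = ' '
      · subst hc
        rw [if_pos (by simp [List.isPrefixOf])]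
        rw [ih rest [] (cur.reverse :: acc) (by simp at h ⊢; omega)]
        simp [pvWords]
      · rw [if_neg (by simp [List.isPrefixOf]; exact fun h' => absurd h'.symm hc)]
        rw [ih rest (c :: cur) acc (by simp at h ⊢; omega)]
        simp [pvWords, hc]

theorem pvSplitOn_eq_words (l : List Char) :
    PySem.Chars.splitOn l [' '] = pvWords [] l := by
  unfold PySem.Chars.splitOn
  rw [pvGo_spec (l.length + 1) l [] [] (by omega)]
  simp

theorem pvFold_eq (l : List Char) (d : PySem.Dict String Int) (w : List Char) :
    (let r := l.foldl pvStepA (d, w)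
     r.1.insert (String.ofList r.2) (r.2.length : Int))
      = (pvWords w l).foldl (fun d w => d.insert (String.ofList w) ((w.length : Int))) d := by
  induction l generalizing d w with
  | nil => simp [pvWords]
  | cons c rest ih =>
    by_cases hc : c = ' '
    · subst hc
      have h1 : pvStepA (d, w) ' ' = (d.insert (String.ofList w) ((w.length : Int)), []) := by
        simp [pvStepA]
      rw [List.foldl_cons, h1, ih]
      simp [pvWords]
    · have h1 : pvStepA (d, w) c = (d, w ++ [c]) := by simp [pvStepA, hc]
      rw [List.foldl_cons, h1, ih]
      simp [pvWords, hc]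

-- ===== VERDICT (by name: the statement is the Claim_ definition above) =====
theorem seccionarPalabras_spec : Claim_equal_seccionarPalabras := by
  intro sentence _
  unfold Spec_seccionarPalabras seccionarPalabras seccionarPalabras_alt
  rw [pvSplitOn_eq_words]
  rw [← pvFold_eq sentence.toList PySem.Dict.empty []]
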